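-- pv_equiv track=rewrite | github.com/CarterCribbs/CS101 | APTs/APT8/InterestingParty.py | bestInvitation
-- ===== SOURCE A (Python) =====
-- def bestInvitation(first,second):
--     totallist = []
--
--     for item in first:
--         countfirst = first.count(item)
--         countsecond = second.count(item)
--         totalcount = countfirst + countsecond
--         totallist.append(totalcount)
--     for item in second:
--         secondcount = second.count(item)
--         totallist.append(secondcount)
--     maxcount = max(totallist)
--     return maxcount
-- ===== SOURCE B (Python) =====
-- def bestInvitation(first, second):
--     counts = {}
--     for item in first + second:
--         counts[item] = counts.get(item, 0) + 1
--     return max(counts.values())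
-- ===== Notes on version B (the rewrite author's own statement) =====
-- stated objective: faster
-- what changed: A's two loops with a repeated list.count scan per element (quadratic) are replaced by one frequency-table pass over the concatenation first+second followed by max over the table's values.
import Mathlib
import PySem

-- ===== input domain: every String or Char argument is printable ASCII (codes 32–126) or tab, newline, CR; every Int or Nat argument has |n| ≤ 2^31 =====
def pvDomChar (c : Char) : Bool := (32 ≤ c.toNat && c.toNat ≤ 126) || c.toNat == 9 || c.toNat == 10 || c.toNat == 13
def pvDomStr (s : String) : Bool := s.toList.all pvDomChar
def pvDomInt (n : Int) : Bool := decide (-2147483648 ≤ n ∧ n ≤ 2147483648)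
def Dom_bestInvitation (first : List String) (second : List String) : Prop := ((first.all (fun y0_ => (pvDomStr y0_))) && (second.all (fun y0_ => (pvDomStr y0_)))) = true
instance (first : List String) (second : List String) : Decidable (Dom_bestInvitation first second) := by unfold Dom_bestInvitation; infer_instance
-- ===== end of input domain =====

-- B replaces A's two quadratic loops of repeated list.count scans by a single
-- frequency-table pass over first ++ second, then takes max of the table's values (faster in a timing run).


-- ===== PORT A =====
def bestInvitation (first : List String) (second : List String) : Int :=
  let totallist : List Int := []
  let totallist := first.foldl (fun acc item =>
      acc ++ [((first.count item : Int) + (second.count item : Int))]) totallist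
  let totallist := second.foldl (fun acc item =>
      acc ++ [((second.count item : Int))]) totallist
  (PySem.List.max? totallist (fun y => y)).getD 0   -- none unreachable under Pre_

-- ===== PORT B =====
def bestInvitation_alt (first : List String) (second : List String) : Int :=
  let counts := (first ++ second).foldl
      (fun d x => d.insert x (d.getD x 0 + 1)) (PySem.Dict.empty : PySem.Dict String Int)
  (PySem.List.max? counts.values (fun y => y)).getD 0   -- none unreachable under Pre_

-- ===== PRECONDITION & SPEC =====
-- Pre_ excludes exactly first = [] AND second = [], where Python A raises ValueError (max of empty list).
def Pre_bestInvitation (first : List String) (second : List String) : Prop :=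
  first ≠ [] ∨ second ≠ []
instance (first : List String) (second : List String) : Decidable (Pre_bestInvitation first second) := by unfold Pre_bestInvitation; infer_instance
def pvWitness_bestInvitation : List String × List String := (["a", "b", "a"], ["b"])

def Spec_bestInvitation (first : List String) (second : List String) (out : Int) : Prop := out = bestInvitation_alt first second
instance (first : List String) (second : List String) (out : Int) : Decidable (Spec_bestInvitation first second out) := by unfold Spec_bestInvitation; infer_instance

-- ===== CLAIM (what is proved, stated in full; the proofs are below) =====
def Claim_equal_bestInvitation : Prop := ∀ (first : List String) (second : List String), Dom_bestInvitation first second → Pre_bestInvitation first second → Spec_bestInvitation first second (bestInvitation first second)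

-- ===== LEMMAS AND PROOFS =====

-- A's totallist is a map over first (combined counts) followed by a map over second (second counts).
theorem totallist_eq (first second : List String) :
    (second.foldl (fun acc item => acc ++ [((second.count item : Int))])
      (first.foldl (fun acc item =>
        acc ++ [((first.count item : Int) + (second.count item : Int))]) []))
    = first.map (fun i => ((first.count i : Int) + (second.count i : Int)))
      ++ second.map (fun i => ((second.count i : Int))) := by
  rw [PySem.List.foldl_append_singleton_eq_map, PySem.List.foldl_append_singleton_eq_map]
  simp

-- B's counter values are the counts of the distinct elements of first ++ second.
theorem values_eq (first second : List String) :
    ((first ++ second).foldl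
      (fun d x => d.insert x (d.getD x 0 + 1)) (PySem.Dict.empty : PySem.Dict String Int)).values
    = (PySem.Set.ofList (first ++ second)).map (fun k => (((first ++ second).count k : Int))) := by
  rw [PySem.Dict.foldl_insert_getD_add_one_eq_counter]
  show (PySem.Dict.counter (first ++ second)).items.map (·.2) = _
  rw [PySem.Dict.items_counter]
  simp [List.map_map, Function.comp]

theorem bestInvitation_spec : Claim_equal_bestInvitation := by
  intro first second _hdom hpre
  unfold Spec_bestInvitation bestInvitation bestInvitation_alt
  simp only []
  rw [totallist_eq, values_eq]
  set xs := first ++ second with hxs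
  set VA := first.map (fun i => ((first.count i : Int) + (second.count i : Int)))
            ++ second.map (fun i => ((second.count i : Int))) with hVA
  set VB := (PySem.Set.ofList xs).map (fun k => ((xs.count k : Int))) with hVB
  -- both lists are nonempty
  have hxs_ne : xs ≠ [] := by
    rcases hpre with h | h <;> simp [hxs, h]
  have hVA_ne : VA ≠ [] := by
    rcases hpre with h | h <;> simp [hVA, h]
  have hVB_ne : VB ≠ [] := by
    intro h
    rcases List.exists_mem_of_ne_nil xs hxs_ne with ⟨a, ha⟩
    have : a ∈ PySem.Set.ofList xs := (PySem.Set.mem_ofList _ _).2 ha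
    have : ((xs.count a : Int)) ∈ VB := by
      rw [hVB]; exact List.mem_map_of_mem this
    rw [h] at this; exact absurd this (List.not_mem_nil)
  obtain ⟨mA, hmA⟩ := Option.ne_none_iff_exists'.1
    (fun h => hVA_ne ((PySem.List.max?_eq_none_iff VA (fun y => y)).1 h))
  obtain ⟨mB, hmB⟩ := Option.ne_none_iff_exists'.1
    (fun h => hVB_ne ((PySem.List.max?_eq_none_iff VB (fun y => y)).1 h))
  rw [hmA, hmB]
  simp only [Option.getD_some]
  have hmA_mem : mA ∈ VA := PySem.List.max?_mem hmA
  have hmB_mem : mB ∈ VB := PySem.List.max?_mem hmB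
  have hmA_max : ∀ y ∈ VA, y ≤ mA := PySem.List.max?_isMax hmA
  have hmB_max : ∀ y ∈ VB, y ≤ mB := PySem.List.max?_isMax hmB
  -- every element of VA is bounded by mB
  have hVA_le : ∀ y ∈ VA, y ≤ mB := by
    intro y hy
    rw [hVA] at hy
    rcases List.mem_append.1 hy with hy | hy
    · obtain ⟨i, hi, rfl⟩ := List.mem_map.1 hy
      have hix : i ∈ xs := by rw [hxs]; exact List.mem_append_left _ hi
      have : ((xs.count i : Int)) ∈ VB := by
        rw [hVB]; exact List.mem_map_of_mem ((PySem.Set.mem_ofList _ _).2 hix)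
      have hb := hmB_max _ this
      rw [hxs] at hb
      simp only [List.count_append] at hb
      push_cast at hb ⊢
      exact hb
    · obtain ⟨i, hi, rfl⟩ := List.mem_map.1 hy
      have hix : i ∈ xs := by rw [hxs]; exact List.mem_append_right _ hi
      have : ((xs.count i : Int)) ∈ VB := by
        rw [hVB]; exact List.mem_map_of_mem ((PySem.Set.mem_ofList _ _).2 hix)
      have hb := hmB_max _ this
      rw [hxs] at hb
      simp only [List.count_append] at hb
      push_cast at hb ⊢
      omega
  -- every element of VB is bounded by mA
  have hVB_le : ∀ y ∈ VB, y ≤ mA := by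
    intro y hy
    rw [hVB] at hy
    obtain ⟨k, hk, rfl⟩ := List.mem_map.1 hy
    have hkx : k ∈ xs := (PySem.Set.mem_ofList _ _).1 hk
    rw [hxs] at hkx
    rcases List.mem_append.1 hkx with hk1 | hk2
    · have : ((first.count k : Int) + (second.count k : Int)) ∈ VA := by
        rw [hVA]; exact List.mem_append_left _ (List.mem_map_of_mem hk1)
      have ha := hmA_max _ this
      rw [hxs]
      simp only [List.count_append]
      push_cast
      push_cast at ha
      exact ha
    · by_cases hk1 : k ∈ first
      · have : ((first.count k : Int) + (second.count k : Int)) ∈ VA := by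
          rw [hVA]; exact List.mem_append_left _ (List.mem_map_of_mem hk1)
        have ha := hmA_max _ this
        rw [hxs]; simp only [List.count_append]; push_cast at ha ⊢; exact ha
      · have hc0 : first.count k = 0 := List.count_eq_zero.2 hk1
        have : ((second.count k : Int)) ∈ VA := by
          rw [hVA]; exact List.mem_append_right _ (List.mem_map_of_mem hk2)
        have ha := hmA_max _ this
        rw [hxs]; simp only [List.count_append, hc0]; push_cast at ha ⊢; omega
  exact le_antisymm (hVA_le _ hmA_mem) (hVB_le _ hmB_mem)
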